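-- pv_equiv track=rewrite | github.com/lavakumarThatisetti/inforsecure-datalearning | api/dataAnalysing.py | topSources
-- ===== SOURCE A (Python) =====
-- def topSources(narrations):
--     top_sources = {
--         "Bank": 0,
--         "Insurance": 0,
--         "Others": 0
--     }
--     for firstValue in narrations:
--         uFirstValue = firstValue.upper()
--         if "BANK" in uFirstValue or "CARD" in uFirstValue or "Loan" in uFirstValue:
--             top_sources["Bank"] = top_sources["Bank"] + 1
--         elif "INS" in uFirstValue:
--             top_sources["Insurance"] = top_sources["Insurance"] + 1
--         else:
--             top_sources['Others'] = top_sources['Others'] + 1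
--     return top_sources
-- ===== SOURCE B (Python) =====
-- def topSources(narrations):
--     # Separate counting passes instead of one incremental elif loop; loans are
--     # counted as Bank (A's "Loan" in an uppercased string can never match).
--     ups = [s.upper() for s in narrations]
--     bankish = lambda u: "BANK" in u or "CARD" in u or "LOAN" in u
--     bank = sum(1 for u in ups if bankish(u))
--     insurance = sum(1 for u in ups if "INS" in u and not bankish(u))
--     return {"Bank": bank, "Insurance": insurance, "Others": len(narrations) - bank - insurance}
-- ===== Notes on version B (the rewrite author's own statement) =====
-- stated objective: alternative
-- what changed: Replaces the single incremental if/elif dict-updating loop by independent counting passes (category counts via filtered counts, Others by subtraction) and fixes the dead 'Loan'-in-uppercased-string test to 'LOAN'.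
-- intended difference: On lists containing a narration whose uppercase form contains 'LOAN' but neither 'BANK' nor 'CARD', A counts it under Insurance/Others because its test 'Loan' in firstValue.upper() can never match, while B counts it under Bank, which is the evidently intended loan categorisation. — e.g. on topSources(["my loan"]): A returns [("Bank", 0), ("Insurance", 0), ("Others", 1)], B returns [("Bank", 1), ("Insurance", 0), ("Others", 0)]
import Mathlib
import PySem

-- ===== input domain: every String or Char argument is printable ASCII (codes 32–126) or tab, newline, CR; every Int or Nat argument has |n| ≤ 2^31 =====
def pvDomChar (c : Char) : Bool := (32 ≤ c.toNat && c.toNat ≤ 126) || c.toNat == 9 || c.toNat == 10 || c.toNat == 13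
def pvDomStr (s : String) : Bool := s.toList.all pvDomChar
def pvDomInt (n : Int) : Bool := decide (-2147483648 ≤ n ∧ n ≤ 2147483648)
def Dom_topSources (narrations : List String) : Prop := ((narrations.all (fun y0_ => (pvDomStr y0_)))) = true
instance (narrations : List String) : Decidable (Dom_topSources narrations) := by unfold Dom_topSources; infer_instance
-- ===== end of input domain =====

-- B replaces A's single incremental if/elif dict-updating loop by independent counting
-- passes (Others by subtraction) and fixes A's dead test `"Loan" in firstValue.upper()`
-- (a mixed-case literal can never occur in an uppercased ASCII string) to "LOAN";
-- the affected inputs are stated in D_topSources below.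


-- ===== PORT A =====
-- loop body of A's for-loop (if/elif/else updating the dict in place)
def topSrcStep (top_sources : PySem.Dict String Int) (firstValue : String) : PySem.Dict String Int :=
  let uFirstValue := PySem.Str.upper firstValue
  if PySem.Str.isIn "BANK" uFirstValue || PySem.Str.isIn "CARD" uFirstValue || PySem.Str.isIn "Loan" uFirstValue then
    top_sources.insert "Bank" (top_sources.getD "Bank" 0 + 1)
  else if PySem.Str.isIn "INS" uFirstValue then
    top_sources.insert "Insurance" (top_sources.getD "Insurance" 0 + 1)
  else
    top_sources.insert "Others" (top_sources.getD "Others" 0 + 1)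

def topSources (narrations : List String) : List (String × Int) :=
  (narrations.foldl topSrcStep
    (PySem.Dict.ofList [("Bank", 0), ("Insurance", 0), ("Others", 0)])).items

-- ===== PORT B =====
-- B's `bankish` predicate on an already-uppercased string
def bankish (u : String) : Bool :=
  PySem.Str.isIn "BANK" u || PySem.Str.isIn "CARD" u || PySem.Str.isIn "LOAN" u

def topSources_alt (narrations : List String) : List (String × Int) :=
  let ups := narrations.map PySem.Str.upper
  let bank : Int := (ups.countP bankish : Nat)
  let insurance : Int := (ups.countP (fun u => PySem.Str.isIn "INS" u && !(bankish u)) : Nat)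
  [("Bank", bank), ("Insurance", insurance),
   ("Others", (narrations.length : Int) - bank - insurance)]

-- ===== PRECONDITION & SPEC =====
-- On lists containing a narration whose uppercase form contains "LOAN" but neither "BANK"
-- nor "CARD", A counts it under Insurance/Others (its 'Loan'-in-uppercased-string test
-- never matches) while B counts it under Bank, the evidently intended categorisation.
def D_topSources (narrations : List String) : Prop :=
  (narrations.any (fun s =>
    PySem.Str.isIn "LOAN" (PySem.Str.upper s)
      && !(PySem.Str.isIn "BANK" (PySem.Str.upper s))
      && !(PySem.Str.isIn "CARD" (PySem.Str.upper s)))) = true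
instance (narrations : List String) : Decidable (D_topSources narrations) := by
  unfold D_topSources; infer_instance

def Spec_topSources (narrations : List String) (out : List (String × Int)) : Prop :=
  ¬ D_topSources narrations → out = topSources_alt narrations
instance (narrations : List String) (out : List (String × Int)) :
    Decidable (Spec_topSources narrations out) := by unfold Spec_topSources; infer_instance

def pvDiffWitness_topSources : List String := ["my loan"]
def pvDiffWitnessOut_topSources : (List (String × Int)) × (List (String × Int)) :=
  ([("Bank", 0), ("Insurance", 0), ("Others", 1)],
   [("Bank", 1), ("Insurance", 0), ("Others", 0)])

-- ===== CLAIM (what is proved, stated in full; the proofs are below) =====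
def Claim_unchanged_topSources : Prop := ∀ (narrations : List String),
  Dom_topSources narrations → Spec_topSources narrations (topSources narrations)
def Claim_changed_topSources : Prop :=
  Dom_topSources (pvDiffWitness_topSources) ∧ D_topSources (pvDiffWitness_topSources) ∧
  topSources (pvDiffWitness_topSources) = pvDiffWitnessOut_topSources.1 ∧
  topSources_alt (pvDiffWitness_topSources) = pvDiffWitnessOut_topSources.2 ∧
  pvDiffWitnessOut_topSources.1 ≠ pvDiffWitnessOut_topSources.2
def Claim_exact_topSources : Prop := ∀ (narrations : List String),
  Dom_topSources narrations → D_topSources narrations →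
  topSources narrations ≠ topSources_alt narrations

-- ===== LEMMAS AND PROOFS =====

-- A's three branch conditions, as predicates on the raw narration
def condA (s : String) : Bool :=
  PySem.Str.isIn "BANK" (PySem.Str.upper s) || PySem.Str.isIn "CARD" (PySem.Str.upper s)
    || PySem.Str.isIn "Loan" (PySem.Str.upper s)
def condIns (s : String) : Bool := PySem.Str.isIn "INS" (PySem.Str.upper s)
def cInsur (s : String) : Bool := !condA s && condIns s
def cOther (s : String) : Bool := !condA s && !condIns s

lemma ofNat_toNat_small (n : Nat) (h : n < 128) : (Char.ofNat n).toNat = n := by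
  unfold Char.ofNat Char.toNat
  rw [dif_pos (by left; omega : n.isValidChar)]
  simp [Char.ofNatAux]

lemma upperChar_ne_o (c : Char) : PySem.Chars.upperChar c ≠ 'o' := by
  unfold PySem.Chars.upperChar
  split
  · rename_i h
    simp only [PySem.Chars.islower, Bool.and_eq_true, decide_eq_true_eq] at h
    obtain ⟨h1, h2⟩ := h
    rw [Char.le_def, UInt32.le_iff_toNat_le] at h1 h2
    intro he
    have := congrArg Char.toNat he
    rw [ofNat_toNat_small _ (by exact Nat.lt_of_le_of_lt (Nat.sub_le _ _) (by
      show Char.toNat c < 128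
      exact Nat.lt_of_le_of_lt h2 (by decide)))] at this
    revert this
    show ¬ (Char.toNat c - 32 = 111)
    have h1' : 97 ≤ Char.toNat c := h1
    have h2' : Char.toNat c ≤ 122 := h2
    omega
  · rename_i h
    intro he; subst he
    exact h (by decide)

lemma loan_not_in_upper (s : String) :
    PySem.Str.isIn "Loan" (PySem.Str.upper s) = false := by
  rw [← Bool.not_eq_true, PySem.Str.isIn_iff_infix]
  intro hinf
  have ho : 'o' ∈ (PySem.Str.upper s).toList := hinf.subset (by decide)
  rw [PySem.Str.toList_upper] at ho
  simp only [PySem.Chars.upper, List.mem_map] at ho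
  obtain ⟨c, _, hc⟩ := ho
  exact upperChar_ne_o c hc

lemma step_eq (b i o : Int) (s : String) :
    topSrcStep (PySem.Dict.mk [("Bank", b), ("Insurance", i), ("Others", o)]) s =
      if condA s then PySem.Dict.mk [("Bank", b + 1), ("Insurance", i), ("Others", o)]
      else if condIns s then PySem.Dict.mk [("Bank", b), ("Insurance", i + 1), ("Others", o)]
      else PySem.Dict.mk [("Bank", b), ("Insurance", i), ("Others", o + 1)] := by
  by_cases hA : condA s
  · have hA' := hA; unfold condA at hA'
    rw [if_pos hA]
    simp only [topSrcStep, hA']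
    rfl
  · have hA' : (PySem.Str.isIn "BANK" (PySem.Str.upper s) || PySem.Str.isIn "CARD" (PySem.Str.upper s)
        || PySem.Str.isIn "Loan" (PySem.Str.upper s)) = false := by
      unfold condA at hA; exact Bool.not_eq_true _ ▸ hA
    rw [if_neg hA]
    by_cases hI : condIns s
    · have hI' := hI; unfold condIns at hI'
      rw [if_pos hI]
      simp only [topSrcStep, hA', hI', Bool.false_eq_true, if_false]
      rfl
    · have hI' : PySem.Str.isIn "INS" (PySem.Str.upper s) = false := by
        unfold condIns at hI; exact Bool.not_eq_true _ ▸ hI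
      rw [if_neg hI]
      simp only [topSrcStep, hA', hI', Bool.false_eq_true, if_false]
      rfl

lemma foldl_topSrc (l : List String) (b i o : Int) :
    l.foldl topSrcStep (PySem.Dict.mk [("Bank", b), ("Insurance", i), ("Others", o)]) =
      PySem.Dict.mk [("Bank", b + (l.countP condA : Nat)),
                     ("Insurance", i + (l.countP cInsur : Nat)),
                     ("Others", o + (l.countP cOther : Nat))] := by
  induction l generalizing b i o with
  | nil => simp
  | cons s l ih =>
    rw [List.foldl_cons, step_eq]
    by_cases hA : condA s
    · rw [if_pos hA, ih]
      simp [hA, cInsur, cOther]; omega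
    · rw [if_neg hA]
      by_cases hI : condIns s
      · rw [if_pos hI, ih]
        simp [hA, hI, cInsur, cOther]; omega
      · rw [if_neg hI, ih]
        simp [hA, hI, cInsur, cOther]; omega

lemma countP_partition (l : List String) :
    l.countP condA + l.countP cInsur + l.countP cOther = l.length := by
  induction l with
  | nil => rfl
  | cons s l ih =>
    simp only [List.countP_cons, List.length_cons, cInsur, cOther]
    by_cases hA : condA s <;> by_cases hI : condIns s <;> simp [hA, hI] <;> omega

lemma condA_eq_bankish (s : String)
    (h : (PySem.Str.isIn "LOAN" (PySem.Str.upper s)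
        && !(PySem.Str.isIn "BANK" (PySem.Str.upper s))
        && !(PySem.Str.isIn "CARD" (PySem.Str.upper s))) ≠ true) :
    condA s = bankish (PySem.Str.upper s) := by
  unfold condA bankish
  rw [loan_not_in_upper]
  cases hL : PySem.Str.isIn "LOAN" (PySem.Str.upper s) <;>
    cases hB : PySem.Str.isIn "BANK" (PySem.Str.upper s) <;>
      cases hC : PySem.Str.isIn "CARD" (PySem.Str.upper s) <;> simp_all

lemma condA_imp_bankish (s : String) (h : condA s = true) :
    bankish (PySem.Str.upper s) = true := by
  unfold condA at h; unfold bankish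
  rw [loan_not_in_upper] at h
  cases hB : PySem.Str.isIn "BANK" (PySem.Str.upper s) <;>
    cases hC : PySem.Str.isIn "CARD" (PySem.Str.upper s) <;> simp_all

lemma countP_lt_of_witness {p q : String → Bool} (l : List String) (s : String)
    (hs : s ∈ l) (hp : p s = false) (hq : q s = true)
    (hmono : ∀ x, p x = true → q x = true) :
    l.countP p < l.countP q := by
  obtain ⟨l1, l2, rfl⟩ := List.append_of_mem hs
  have m1 : l1.countP p ≤ l1.countP q := List.countP_mono_left (fun x _ => hmono x)
  have m2 : l2.countP p ≤ l2.countP q := List.countP_mono_left (fun x _ => hmono x)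
  simp [List.countP_append, hp, hq]
  omega

lemma topSources_eq_counts (narrations : List String) :
    topSources narrations =
      [("Bank", ((narrations.countP condA : Nat) : Int)),
       ("Insurance", ((narrations.countP cInsur : Nat) : Int)),
       ("Others", ((narrations.countP cOther : Nat) : Int))] := by
  unfold topSources
  rw [show PySem.Dict.ofList [("Bank", (0:Int)), ("Insurance", 0), ("Others", 0)] =
        PySem.Dict.mk [("Bank", 0), ("Insurance", 0), ("Others", 0)] from rfl,
      foldl_topSrc]
  simp

lemma alt_eq_counts (narrations : List String) :
    topSources_alt narrations =
      [("Bank", ((narrations.countP (fun s => bankish (PySem.Str.upper s)) : Nat) : Int)),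
       ("Insurance", ((narrations.countP
          (fun s => PySem.Str.isIn "INS" (PySem.Str.upper s) && !(bankish (PySem.Str.upper s))) : Nat) : Int)),
       ("Others", (narrations.length : Int)
          - ((narrations.countP (fun s => bankish (PySem.Str.upper s)) : Nat) : Int)
          - ((narrations.countP
          (fun s => PySem.Str.isIn "INS" (PySem.Str.upper s) && !(bankish (PySem.Str.upper s))) : Nat) : Int))] := by
  unfold topSources_alt
  simp [List.countP_map, Function.comp_def]

-- ===== VERDICT (by name: the statement is the Claim_ definition above) =====
theorem topSources_spec : Claim_unchanged_topSources := by
  intro narrations _ hD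
  unfold D_topSources at hD
  replace hD : narrations.any (fun s =>
      PySem.Str.isIn "LOAN" (PySem.Str.upper s)
        && !(PySem.Str.isIn "BANK" (PySem.Str.upper s))
        && !(PySem.Str.isIn "CARD" (PySem.Str.upper s))) = false := Bool.not_eq_true _ ▸ hD
  rw [List.any_eq_false] at hD
  rw [topSources_eq_counts, alt_eq_counts]
  have hbank : narrations.countP condA
      = narrations.countP (fun s => bankish (PySem.Str.upper s)) :=
    List.countP_congr (fun s hs => by rw [condA_eq_bankish s (hD s hs)])
  have hins : narrations.countP cInsur = narrations.countP
      (fun s => PySem.Str.isIn "INS" (PySem.Str.upper s) && !(bankish (PySem.Str.upper s))) := by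
    refine List.countP_congr (fun s hs => ?_)
    unfold cInsur condIns
    rw [condA_eq_bankish s (hD s hs)]
    rw [Bool.and_comm]
  have hpart := countP_partition narrations
  have hoth : ((narrations.countP cOther : Nat) : Int) =
      (narrations.length : Int)
        - ((narrations.countP (fun s => bankish (PySem.Str.upper s)) : Nat) : Int)
        - ((narrations.countP
            (fun s => PySem.Str.isIn "INS" (PySem.Str.upper s) && !(bankish (PySem.Str.upper s))) : Nat) : Int) := by
    rw [← hbank, ← hins]; omega
  rw [hbank, hins, hoth]

theorem topSources_changed : Claim_changed_topSources := by
  unfold Claim_changed_topSources; decide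

theorem topSources_tight : Claim_exact_topSources := by
  intro narrations _ hD heq
  unfold D_topSources at hD
  rw [List.any_eq_true] at hD
  obtain ⟨s, hs, hcond⟩ := hD
  simp only [Bool.and_eq_true, Bool.not_eq_true'] at hcond
  obtain ⟨⟨hL, hB⟩, hC⟩ := hcond
  have hpA : condA s = false := by
    unfold condA; rw [loan_not_in_upper, hB, hC]; rfl
  have hqB : bankish (PySem.Str.upper s) = true := by
    unfold bankish; rw [hL, hB, hC]; rfl
  have hlt : narrations.countP condA <
      narrations.countP (fun x => bankish (PySem.Str.upper x)) :=
    countP_lt_of_witness narrations s hs hpA hqB condA_imp_bankish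
  rw [topSources_eq_counts, alt_eq_counts] at heq
  have hhead : ((narrations.countP condA : Nat) : Int) =
      ((narrations.countP (fun x => bankish (PySem.Str.upper x)) : Nat) : Int) := by
    have := congrArg (fun l => l.headD ("", 0)) heq
    simpa using this
  omega
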